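-- pv_equiv track=rewrite | github.com/yannickloth/W33-Theory | tools/minimal_global_identity_certificates.py | _reject_masks
-- ===== SOURCE A (Python) =====
-- from typing import Any, Callable, Dict, List, Sequence, Tuple
--
-- def _reject_masks(
--     masks: Sequence[int], candidate_count: int, target_idx: int
-- ) -> Tuple[List[int], int]:
--     all_bits = (1 << candidate_count) - 1
--     target_bit = 1 << target_idx
--     reject: List[int] = []
--
--     # Compact non-target candidate indices by deleting target bit position.
--     for sat_mask in masks:
--         fail = (all_bits ^ sat_mask) & (all_bits ^ target_bit)
--         lower = fail & (target_bit - 1)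
--         upper = fail >> (target_idx + 1)
--         compact = lower | (upper << target_idx)
--         reject.append(compact)
--
--     universe = (1 << (candidate_count - 1)) - 1
--     return reject, universe
-- ===== SOURCE B (Python) =====
-- from typing import List, Sequence, Tuple
--
-- def _reject_masks(
--     masks: Sequence[int], candidate_count: int, target_idx: int
-- ) -> Tuple[List[int], int]:
--     all_bits = (1 << candidate_count) - 1
--     target_bit = 1 << target_idx
--     reject: List[int] = []
--
--     for sat_mask in masks:
--         fail = (all_bits ^ sat_mask) & (all_bits ^ target_bit)
--         # rebuild the compact mask bit by bit, dropping the target position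
--         compact = 0
--         for j in range(fail.bit_length()):
--             if j == target_idx:
--                 continue
--             if (fail >> j) & 1:
--                 compact |= 1 << (j if j < target_idx else j - 1)
--         reject.append(compact)
--
--     universe = (1 << (candidate_count - 1)) - 1
--     return reject, universe
-- ===== Notes on version B (the rewrite author's own statement) =====
-- stated objective: alternative
-- what changed: The branchless arithmetic bit-splice (mask with target_bit-1, shift the upper part down and re-OR) is replaced by an explicit inner loop over the bit positions of fail that rebuilds the compact mask bit by bit, skipping the target position.
import Mathlib
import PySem

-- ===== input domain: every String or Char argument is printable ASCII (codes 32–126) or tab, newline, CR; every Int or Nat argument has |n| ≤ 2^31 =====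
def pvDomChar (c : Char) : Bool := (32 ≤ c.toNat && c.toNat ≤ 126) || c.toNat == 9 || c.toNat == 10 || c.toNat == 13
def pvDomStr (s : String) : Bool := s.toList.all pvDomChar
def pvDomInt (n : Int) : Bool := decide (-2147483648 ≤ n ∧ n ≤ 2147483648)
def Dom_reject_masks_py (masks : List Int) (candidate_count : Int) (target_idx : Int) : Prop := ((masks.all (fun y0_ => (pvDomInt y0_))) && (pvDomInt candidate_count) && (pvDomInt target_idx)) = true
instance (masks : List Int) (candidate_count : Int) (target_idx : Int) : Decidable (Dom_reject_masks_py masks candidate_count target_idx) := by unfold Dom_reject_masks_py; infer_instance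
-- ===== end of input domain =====

-- B rebuilds each compact mask position-by-position with an explicit inner loop over fail's
-- bit positions (skipping the target position) instead of A's branchless arithmetic bit-splice;
-- objective: alternative (same result, genuinely different per-mask mechanism).


-- ===== PORT A =====
def reject_masks_py (masks : List Int) (candidate_count : Int) (target_idx : Int) : List Int × Int :=
  let all_bits : Int := (1 <<< candidate_count.toNat) - 1
  let target_bit : Int := (1 : Int) <<< target_idx.toNat
  let reject : List Int := masks.foldl (fun acc sat_mask =>
    let fail := PySem.Int.band (PySem.Int.bxor all_bits sat_mask) (PySem.Int.bxor all_bits target_bit)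
    let lower := PySem.Int.band fail (target_bit - 1)
    let upper := fail >>> (target_idx + 1).toNat
    let compact := PySem.Int.bor lower (upper <<< target_idx.toNat)
    acc ++ [compact]) []
  (reject, (1 <<< (candidate_count - 1).toNat) - 1)

-- ===== PORT B =====
-- B's inner loop: rebuild `compact` bit by bit from `fail`, skipping the target position
def pvAltCompact (fail : Int) (target_idx : Int) : Int :=
  (List.range (PySem.Int.bitLength fail)).foldl
    (fun (compact : Int) (j : Nat) =>
      if (j : Int) = target_idx then compact
      else if PySem.Int.band (fail >>> j) 1 ≠ 0 then
        PySem.Int.bor compact ((1 : Int) <<< (if (j : Int) < target_idx then j else j - 1))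
      else compact) 0

def reject_masks_py_alt (masks : List Int) (candidate_count : Int) (target_idx : Int) : List Int × Int :=
  let all_bits : Int := (1 <<< candidate_count.toNat) - 1
  let target_bit : Int := (1 : Int) <<< target_idx.toNat
  let reject : List Int := masks.foldl (fun acc sat_mask =>
    let fail := PySem.Int.band (PySem.Int.bxor all_bits sat_mask) (PySem.Int.bxor all_bits target_bit)
    acc ++ [pvAltCompact fail target_idx]) []
  (reject, (1 <<< (candidate_count - 1).toNat) - 1)

-- ===== PRECONDITION & SPEC =====
-- Pre_ excludes exactly the inputs where Python raises ValueError ("negative shift count"):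
-- candidate_count ≤ 0 (the shift by candidate_count - 1) or target_idx < 0.
def Pre_reject_masks_py (masks : List Int) (candidate_count : Int) (target_idx : Int) : Prop :=
  1 ≤ candidate_count ∧ 0 ≤ target_idx
instance (masks : List Int) (candidate_count : Int) (target_idx : Int) : Decidable (Pre_reject_masks_py masks candidate_count target_idx) := by unfold Pre_reject_masks_py; infer_instance

def pvWitness_reject_masks_py : List Int × Int × Int := ([5, -3], 3, 1)

def Spec_reject_masks_py (masks : List Int) (candidate_count : Int) (target_idx : Int) (out : List Int × Int) : Prop := out = reject_masks_py_alt masks candidate_count target_idx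
instance (masks : List Int) (candidate_count : Int) (target_idx : Int) (out : List Int × Int) : Decidable (Spec_reject_masks_py masks candidate_count target_idx out) := by unfold Spec_reject_masks_py; infer_instance

-- ===== CLAIM (what is proved, stated in full; the proofs are below) =====
def Claim_equal_reject_masks_py : Prop := ∀ (masks : List Int) (candidate_count : Int) (target_idx : Int), Dom_reject_masks_py masks candidate_count target_idx → Pre_reject_masks_py masks candidate_count target_idx → Spec_reject_masks_py masks candidate_count target_idx (reject_masks_py masks candidate_count target_idx)

-- ===== LEMMAS AND PROOFS =====

-- the splice of the low n bits of F with bit position t deleted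
def pvSplice (F t n : Nat) : Nat := (F % 2^n) % 2^t + ((F % 2^n) / 2^(t+1)) * 2^t

-- B's inner-loop step with fail = ↑F and target = ↑t (alpha-equal to pvAltCompact's lambda)
def pvStep (F t : Nat) : Int → Nat → Int := fun compact j =>
  if (j : Int) = (t : Int) then compact
  else if PySem.Int.band ((F : Int) >>> j) 1 ≠ 0 then
    PySem.Int.bor compact ((1 : Int) <<< (if (j : Int) < (t : Int) then j else j - 1))
  else compact

lemma pvSplice_of_lt (x t : Nat) (hx : x < 2^t) : x % 2^t + (x / 2^(t+1)) * 2^t = x := by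
  rw [Nat.mod_eq_of_lt hx, Nat.div_eq_of_lt (lt_of_lt_of_le hx (Nat.pow_le_pow_right (by norm_num) (by omega)))]
  ring

lemma pvStep_eq_case (x b t : Nat) (hx : x < 2^t) (hb : b ≤ 1) :
    (x + b * 2^t) % 2^t + ((x + b * 2^t) / 2^(t+1)) * 2^t = x % 2^t + (x / 2^(t+1)) * 2^t := by
  have h1 : (x + b * 2^t) % 2^t = x % 2^t := by rw [Nat.add_mul_mod_self_right]
  have hlt : x + b * 2^t < 2^(t+1) := by
    have hb2 : b * 2^t ≤ 2^t := by nlinarith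
    have h2 : (2:Nat)^(t+1) = 2^t + 2^t := by ring
    omega
  have h2 : (x + b * 2^t) / 2^(t+1) = 0 := Nat.div_eq_of_lt hlt
  have h4 : x / 2^(t+1) = 0 := Nat.div_eq_of_lt (lt_of_lt_of_le hx (Nat.pow_le_pow_right (by norm_num) (by omega)))
  rw [h1, h2, h4]

lemma pvStep_lt_case (x t n : Nat) (hx : x < 2^n) (hnt : n < t) :
    (x + 2^n) % 2^t + ((x + 2^n) / 2^(t+1)) * 2^t = x + 2^n := by
  have hx2t : x + 2^n < 2^t := by
    have h1 : 2^(n+1) ≤ 2^t := Nat.pow_le_pow_right (by norm_num) (by omega)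
    have h2 : (2:Nat)^(n+1) = 2^n + 2^n := by ring
    omega
  exact pvSplice_of_lt _ t hx2t

lemma pvStep_gt_case (x t m : Nat) :
    (x + 2^(t+1+m)) % 2^t + ((x + 2^(t+1+m)) / 2^(t+1)) * 2^t
      = (x % 2^t + (x / 2^(t+1)) * 2^t) + 2^(t+m) := by
  have h1 : (x + 2^(t+1+m)) % 2^t = x % 2^t := by
    have e2 : (2:Nat)^(t+1+m) = (2^(m+1)) * 2^t := by rw [← pow_add]; ring_nf
    rw [e2, Nat.add_mul_mod_self_right]
  have h2 : (x + 2^(t+1+m)) / 2^(t+1) = x / 2^(t+1) + 2^m := by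
    have e1 : (2:Nat)^(t+1+m) = 2^m * 2^(t+1) := by rw [← pow_add]; ring_nf
    rw [e1, Nat.add_mul_div_right _ _ (Nat.two_pow_pos _)]
  rw [h1, h2, Nat.add_mul, ← pow_add]; ring

lemma pvSplice_lt (x t m : Nat) (hx : x < 2^(t+1+m)) :
    x % 2^t + (x / 2^(t+1)) * 2^t < 2^(t+m) := by
  have h1 : x % 2^t < 2^t := Nat.mod_lt _ (Nat.two_pow_pos _)
  have h2 : x / 2^(t+1) < 2^m := by
    rw [Nat.div_lt_iff_lt_mul (Nat.two_pow_pos _)]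
    calc x < 2^(t+1+m) := hx
    _ = 2^m * 2^(t+1) := by rw [← pow_add]; ring_nf
  have h3 : (x / 2^(t+1)) * 2^t ≤ (2^m - 1) * 2^t := Nat.mul_le_mul_right _ (by omega)
  have h5 : (2^m - 1) * 2^t = 2^m * 2^t - 2^t := by rw [Nat.sub_mul, one_mul]
  have h6 : (2:Nat)^t ≤ 2^m * 2^t := Nat.le_mul_of_pos_left _ (Nat.two_pow_pos _)
  have h7 : (2:Nat)^m * 2^t = 2^(t+m) := by rw [← pow_add]; ring_nf
  omega

-- disjoint OR is addition (wrapper around Mathlib's Nat.two_pow_add_eq_or_of_lt)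
lemma pvOr_eq_add (a k : Nat) (h : a < 2^k) : a ||| 2^k = a + 2^k := by
  have := Nat.two_pow_add_eq_or_of_lt h 1
  simpa [Nat.lor_comm, Nat.add_comm] using this.symm

lemma pvShiftOne (k : Nat) : ((1:Int) <<< k) = ((2^k : Nat) : Int) := by
  show (((1 <<< k : Nat)) : Int) = _
  rw [Nat.shiftLeft_eq]; norm_num

lemma pvOne_le_shift (k : Nat) : (1:Nat) ≤ 1 <<< k := by
  rw [Nat.shiftLeft_eq]; simpa using Nat.one_le_two_pow

-- invariant of B's inner loop: after scanning bits 0..n-1, compact is the splice of F % 2^n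
lemma pvFold_range (F t : Nat) : ∀ n : Nat,
    (List.range n).foldl (pvStep F t) 0 = ((pvSplice F t n : Nat) : Int) := by
  intro n
  induction n with
  | zero => simp [pvSplice]
  | succ n ih =>
    rw [List.range_succ, List.foldl_append, List.foldl_cons, List.foldl_nil, ih]
    set x := F % 2^n with hxdef
    have hx : x < 2^n := Nat.mod_lt _ (Nat.two_pow_pos _)
    set b := F / 2^n % 2 with hbdef
    have hb : b ≤ 1 := by omega
    have hsucc : F % 2^(n+1) = b * 2^n + x := by
      rw [Nat.mod_pow_succ]; ring
    have hcond : (PySem.Int.band ((F : Int) >>> n) 1 ≠ 0) ↔ (b = 1) := by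
      have e1 : ((F : Int) >>> n) = ((F >>> n : Nat) : Int) := rfl
      rw [e1, show ((1:Int) = ((1:Nat):Int)) from rfl, PySem.Int.band_natCast,
        Nat.and_one_is_mod, Nat.shiftRight_eq_div_pow, Nat.cast_ne_zero]
      omega
    unfold pvStep
    by_cases hnt : n = t
    · subst hnt
      rw [if_pos rfl]
      have hkey : pvSplice F n (n+1) = pvSplice F n n := by
        unfold pvSplice
        rw [hsucc, show b * 2^n + x = x + b * 2^n from by ring,
          pvStep_eq_case x b n hx hb]
      rw [hkey]
    · have hne : ((n:Int) ≠ (t:Int)) := by exact_mod_cast hnt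
      rw [if_neg hne]
      by_cases hbit : b = 1
      · rw [if_pos (hcond.mpr hbit)]
        rcases Nat.lt_or_ge n t with hlt | hge
        · rw [if_pos (show ((n:Int) < (t:Int)) from by exact_mod_cast hlt)]
          have hxt : x < 2^t := lt_of_lt_of_le hx (Nat.pow_le_pow_right (by norm_num) (by omega))
          have hSx2 : pvSplice F t n = x := by
            rw [show pvSplice F t n = x % 2^t + (x / 2^(t+1)) * 2^t from rfl]
            exact pvSplice_of_lt x t hxt
          have hkey : pvSplice F t (n+1) = x + 2^n := by
            unfold pvSplice
            rw [hsucc, show b * 2^n + x = x + 2^n from by rw [hbit]; ring,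
              pvStep_lt_case x t n hx hlt]
          rw [hkey, hSx2, pvShiftOne, PySem.Int.bor_natCast, pvOr_eq_add x n hx]
        · obtain ⟨m, hm⟩ : ∃ m, n = t + 1 + m := ⟨n - t - 1, by omega⟩
          rw [if_neg (show ¬ ((n:Int) < (t:Int)) from by exact_mod_cast (by omega : ¬ n < t))]
          have hS : pvSplice F t n < 2^(t+m) := by
            rw [show pvSplice F t n = x % 2^t + (x / 2^(t+1)) * 2^t from rfl]
            exact pvSplice_lt x t m (by rw [← hm]; exact hx)
          have hkey : pvSplice F t (n+1) = pvSplice F t n + 2^(t+m) := by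
            conv_lhs => unfold pvSplice
            rw [hsucc, show b * 2^n + x = x + 2^(t+1+m) from by rw [hbit, hm]; ring,
              pvStep_gt_case x t m,
              show x % 2^t + (x / 2^(t+1)) * 2^t = pvSplice F t n from rfl]
          have hn1 : n - 1 = t + m := by omega
          rw [hkey, hn1, pvShiftOne, PySem.Int.bor_natCast, pvOr_eq_add _ _ hS]
      · rw [if_neg (fun h => absurd (hcond.mp h) (by omega))]
        have hkey : pvSplice F t (n+1) = pvSplice F t n := by
          unfold pvSplice
          rw [hsucc, show b = 0 from by omega]
          norm_num
          rfl
        rw [hkey]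

-- A's per-mask splice equals B's inner-loop value, on the Nat image
lemma pvCompact_eq (F t : Nat) :
    PySem.Int.bor (PySem.Int.band (F : Int) ((1:Int) <<< t - 1)) (((F : Int) >>> (t+1)) <<< t)
      = (List.range (PySem.Int.bitLength (F : Int))).foldl (pvStep F t) 0 := by
  rw [pvFold_range]
  have e1 : ((1:Int) <<< t - 1) = ((2^t - 1 : Nat) : Int) := by
    rw [pvShiftOne]
    have : (1:Nat) ≤ 2^t := Nat.one_le_two_pow
    push_cast [this]
    ring
  have e3 : ((F : Int) >>> (t+1)) = ((F >>> (t+1) : Nat) : Int) := rfl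
  have e4 : (((F >>> (t+1) : Nat) : Int)) <<< t = (((F >>> (t+1)) <<< t : Nat) : Int) := rfl
  rw [e1, PySem.Int.band_natCast, e3, e4, PySem.Int.bor_natCast]
  congr 1
  rw [Nat.and_two_pow_sub_one_eq_mod, Nat.shiftRight_eq_div_pow, Nat.shiftLeft_eq]
  have hmod : F % 2^(PySem.Int.bitLength (F : Int)) = F := by
    apply Nat.mod_eq_of_lt
    have := PySem.Int.lt_two_pow_bitLength (F : Int)
    simpa using this
  unfold pvSplice
  rw [hmod]
  have h := Nat.two_pow_add_eq_or_of_lt (Nat.mod_lt F (Nat.two_pow_pos t) : F % 2^t < 2^t) (F / 2^(t+1))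
  rw [Nat.lor_comm, Nat.mul_comm (2^t) (F / 2^(t+1))] at h
  omega

-- same fact stated against pvAltCompact, for any nonnegative fail
lemma pvCompact_eq' (fail : Int) (hf : 0 ≤ fail) (t : Nat) :
    PySem.Int.bor (PySem.Int.band fail ((1:Int) <<< t - 1)) ((fail >>> (t+1)) <<< t)
      = pvAltCompact fail (t : Int) := by
  obtain ⟨F, rfl⟩ : ∃ F : Nat, fail = (F : Int) := ⟨fail.toNat, (Int.toNat_of_nonneg hf).symm⟩
  have halt : pvAltCompact (F : Int) (t : Int)
      = (List.range (PySem.Int.bitLength (F : Int))).foldl (pvStep F t) 0 := by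
    unfold pvAltCompact pvStep
    rfl
  rw [halt]
  exact pvCompact_eq F t

lemma pvMain (masks : List Int) (candidate_count : Int) (target_idx : Int)
    (hpre : 1 ≤ candidate_count ∧ 0 ≤ target_idx) :
    reject_masks_py masks candidate_count target_idx = reject_masks_py_alt masks candidate_count target_idx := by
  obtain ⟨t, rfl⟩ : ∃ t : Nat, target_idx = (t : Int) :=
    ⟨target_idx.toNat, (Int.toNat_of_nonneg hpre.2).symm⟩
  unfold reject_masks_py reject_masks_py_alt
  have ht1 : (((t : Int) + 1)).toNat = t + 1 := by omega
  have ht0 : ((t : Int)).toNat = t := by omega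
  simp only [ht0, ht1]
  refine Prod.ext ?_ rfl
  rw [PySem.List.foldl_append_singleton_eq_map, PySem.List.foldl_append_singleton_eq_map]
  apply List.map_congr_left
  intro m _
  have hab : (0:Int) ≤ (1 <<< candidate_count.toNat : Int) - 1 := by
    have h1 : (1:Nat) ≤ 1 <<< candidate_count.toNat := pvOne_le_shift _
    have h2 : ((1 <<< candidate_count.toNat : Int)) = (((1 <<< candidate_count.toNat : Nat)) : Int) := rfl
    omega
  have htb : (0:Int) ≤ (1 : Int) <<< t := by
    have h1 : ((1:Int) <<< t) = (((1 <<< t : Nat)) : Int) := rfl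
    have h2 := pvOne_le_shift t
    omega
  have hy : 0 ≤ PySem.Int.bxor ((1 <<< candidate_count.toNat : Int) - 1) ((1:Int) <<< t) := by
    rw [PySem.Int.bxor_of_nonneg hab htb]
    positivity
  have hfail : 0 ≤ PySem.Int.band
      (PySem.Int.bxor ((1 <<< candidate_count.toNat : Int) - 1) m)
      (PySem.Int.bxor ((1 <<< candidate_count.toNat : Int) - 1) ((1:Int) <<< t)) := by
    rw [PySem.Int.band_comm]
    exact PySem.Int.band_nonneg_of_nonneg_left _ hy
  exact pvCompact_eq' _ hfail t

-- ===== VERDICT (by name: the statement is the Claim_ definition above) =====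
theorem reject_masks_py_spec : Claim_equal_reject_masks_py := by
  intro masks candidate_count target_idx _ hpre
  unfold Spec_reject_masks_py
  exact pvMain masks candidate_count target_idx ⟨hpre.1, hpre.2⟩
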